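-- pv_equiv track=rewrite | github.com/loserrain/UVa-1 | 706/lc.py | print_4
-- ===== SOURCE A (Python) =====
-- def init_grid(s):
--     grid = []
--     for i in range(2*s + 3):
--         grid.append([' '] * (s+2))
--
--     return grid
--
-- def print_4(s):
--     grid = init_grid(s)
--     for i in [s+1]:
--         for j in range(1, s+1):
--             grid[i][j] = '-'
--
--     for i in range(1, s+1):
--         grid[i][0] = '|'
--         grid[i][-1] = '|'
--
--     for i in range(s+2, 2*s + 2):
--         grid[i][-1] = '|'
--
--     return grid
-- ===== SOURCE B (Python) =====
-- def print_4(s):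
--     # build column-major: three column shapes, transpose with zip
--     first = [' '] + ['|'] * s + [' '] * (s + 2)
--     mid = [' '] * (s + 1) + ['-'] + [' '] * (s + 1)
--     last = [' '] + ['|'] * s + [' '] + ['|'] * s + [' ']
--     cols = [first if j == 0 else last if j == s + 1 else mid
--             for j in range(s + 2)]
--     return list(map(list, zip(*cols)))
-- ===== Notes on version B (the rewrite author's own statement) =====
-- stated objective: alternative
-- what changed: B builds the figure column-major -- three column shapes (left bar, dash column, right bar) assembled by list concatenation -- and transposes them with zip, instead of A's row-major mutation of a pre-allocated space grid.
-- outside the precondition, e.g. on print_4(-1): A returns [[' ']], B returns [[' '], [' ']]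
import Mathlib
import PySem

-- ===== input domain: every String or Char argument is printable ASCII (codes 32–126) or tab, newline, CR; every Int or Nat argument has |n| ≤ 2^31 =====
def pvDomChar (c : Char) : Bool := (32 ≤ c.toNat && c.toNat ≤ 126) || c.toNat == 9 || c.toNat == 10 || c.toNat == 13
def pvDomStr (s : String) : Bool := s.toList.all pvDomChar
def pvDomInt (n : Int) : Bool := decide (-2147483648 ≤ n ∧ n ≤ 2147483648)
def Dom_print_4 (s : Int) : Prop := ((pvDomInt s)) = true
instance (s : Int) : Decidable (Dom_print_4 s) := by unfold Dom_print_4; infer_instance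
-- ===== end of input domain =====

-- B builds the figure column-major (three column shapes assembled by concatenation) and
-- transposes with zip, instead of A's row-major mutation of a pre-allocated space grid
-- (objective: alternative).

-- ===== PORT A =====
-- grid[i][j] = v  (row fetched, updated, written back; rows are independent fresh lists in A)
def print_4_setCell (g : List (List String)) (i j : Int) (v : String) : List (List String) :=
  PySem.List.pySetD g i (PySem.List.pySetD (PySem.List.pyGetD g i []) j v)

def init_grid (s : Int) : List (List String) :=
  (PySem.List.pyRange 0 (2*s+3) 1).foldl (fun g _ => g ++ [PySem.List.pyRepeat [" "] (s+2)]) []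

def print_4 (s : Int) : List (List String) :=
  let g1 := [s+1].foldl (fun g i =>
      (PySem.List.pyRange 1 (s+1) 1).foldl (fun g j => print_4_setCell g i j "-") g) (init_grid s)
  let g2 := (PySem.List.pyRange 1 (s+1) 1).foldl
      (fun g i => print_4_setCell (print_4_setCell g i 0 "|") i (-1) "|") g1
  (PySem.List.pyRange (s+2) (2*s+2) 1).foldl (fun g i => print_4_setCell g i (-1) "|") g2

-- ===== PORT B =====
-- the three column shapes of Source B, built by list concatenation
def print_4_col_first (s : Int) : List String :=
  [" "] ++ PySem.List.pyRepeat ["|"] s ++ PySem.List.pyRepeat [" "] (s+2)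
def print_4_col_mid (s : Int) : List String :=
  PySem.List.pyRepeat [" "] (s+1) ++ ["-"] ++ PySem.List.pyRepeat [" "] (s+1)
def print_4_col_last (s : Int) : List String :=
  [" "] ++ PySem.List.pyRepeat ["|"] s ++ [" "] ++ PySem.List.pyRepeat ["|"] s ++ [" "]

-- zip(*cols): take one element from the head of every column until some column is exhausted
def pvZipStar (cols : List (List String)) : List (List String) :=
  if cols = [] ∨ cols.any (·.isEmpty) then []
  else cols.map (fun c => c.getD 0 " ") :: pvZipStar (cols.map (·.tail))
termination_by (cols.map List.length).sum
decreasing_by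
  rename_i h
  simp only [List.map_subtype, List.unattach_attach, List.map_map]
  refine List.sum_lt_sum _ _
    (fun c _ => by simp only [Function.comp_apply, List.length_tail]; omega) ?_
  have hne : cols ≠ [] := fun hc => h (Or.inl hc)
  obtain ⟨c, hc⟩ := List.exists_mem_of_ne_nil _ hne
  refine ⟨c, hc, ?_⟩
  have h3 : ¬ c.isEmpty := fun hb => h (Or.inr (List.any_eq_true.2 ⟨c, hc, hb⟩))
  have h4 : c.length ≠ 0 := by simpa [List.isEmpty_iff, List.length_eq_zero_iff] using h3
  simp only [Function.comp_apply, List.length_tail]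
  omega

def print_4_alt (s : Int) : List (List String) :=
  let cols := (PySem.List.pyRange 0 (s+2) 1).map (fun j =>
    if j = 0 then print_4_col_first s
    else if j = s+1 then print_4_col_last s
    else print_4_col_mid s)
  pvZipStar cols

-- ===== PRECONDITION & SPEC =====
-- Pre_ excludes only the degenerate size s = -1, where A's accidental single blank row
-- clashes with B's taller concatenated columns, a corner no caller of this LCD printer uses.
def Pre_print_4 (s : Int) : Prop := s ≠ -1
instance (s : Int) : Decidable (Pre_print_4 s) := by unfold Pre_print_4; infer_instance
def pvWitness_print_4 : Int := 2

def Spec_print_4 (s : Int) (out : List (List String)) : Prop := out = print_4_alt s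
instance (s : Int) (out : List (List String)) : Decidable (Spec_print_4 s out) := by unfold Spec_print_4; infer_instance

-- ===== CLAIM (what is proved, stated in full; the proofs are below) =====
def Claim_equal_print_4 : Prop := ∀ (s : Int), Dom_print_4 s → Pre_print_4 s → Spec_print_4 s (print_4 s)

-- ===== LEMMAS AND PROOFS =====

-- common row-shape form both ports are reduced to
def barN (m : Nat) : List String :=
  (List.range (m+2)).map (fun j => if j = 0 ∨ j = m+1 then "|" else " ")
def dashN (m : Nat) : List String :=
  (List.range (m+2)).map (fun j => if 1 ≤ j ∧ j ≤ m then "-" else " ")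
def tailN (m : Nat) : List String :=
  (List.range (m+2)).map (fun j => if j = m+1 then "|" else " ")
def pvRowsForm (m : Nat) : List (List String) :=
  (List.range (2*m+3)).map (fun k =>
    if 1 ≤ k ∧ k ≤ m then barN m
    else if k = m+1 then dashN m
    else if m+2 ≤ k ∧ k ≤ 2*m+1 then tailN m
    else List.replicate (m+2) " ")

-- ---- A-side: fold-of-updates characterisation ----
def pvUpdRow (g : List (List String)) (i : Int) (f : List String → List String) : List (List String) :=
  PySem.List.pySetD g i (f (PySem.List.pyGetD g i []))

lemma length_updRow (g : List (List String)) (i : Int) (f : List String → List String) :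
    (pvUpdRow g i f).length = g.length := by
  simp [pvUpdRow, PySem.List.length_pySetD]

lemma getElem?_updRow (g : List (List String)) (i : Int) (f : List String → List String)
    (hi : 0 ≤ i) (k : Nat) :
    (pvUpdRow g i f)[k]? = if (k : Int) = i ∧ k < g.length then f <$> g[k]? else g[k]? := by
  obtain ⟨n, rfl⟩ := Int.eq_ofNat_of_zero_le hi
  unfold pvUpdRow
  rw [PySem.List.pySetD_of_nonneg _ _ (by positivity)]
  by_cases h : n < g.length
  · rw [PySem.List.pyGetD_eq_getElem _ _ (by positivity) (by exact_mod_cast h)]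
    simp only [Int.toNat_natCast, List.getElem?_set]
    by_cases hk : n = k
    · subst hk
      simp [h]
    · rw [if_neg hk, if_neg (by omega)]
  · rw [List.set_eq_of_length_le (by omega), if_neg (by omega)]

lemma updRow_id (g : List (List String)) (i : Int) (hi : 0 ≤ i) :
    pvUpdRow g i (fun r => r) = g := by
  refine List.ext_getElem? fun k => ?_
  rw [getElem?_updRow g i _ hi]
  split_ifs with h
  · simp [List.getElem?_eq_getElem h.2]
  · rfl

lemma updRow_updRow (g : List (List String)) (i : Int) (f h : List String → List String)
    (hi : 0 ≤ i) :
    pvUpdRow (pvUpdRow g i f) i h = pvUpdRow g i (fun r => h (f r)) := by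
  refine List.ext_getElem? fun k => ?_
  rw [getElem?_updRow _ i h hi, getElem?_updRow _ i f hi, getElem?_updRow _ i _ hi,
    length_updRow]
  split_ifs with hc
  · cases g[k]? <;> rfl
  · rfl

lemma foldl_updRow_same (js : List Int) (ψ : Int → List String → List String) (i : Int)
    (hi : 0 ≤ i) :
    ∀ g, js.foldl (fun g j => pvUpdRow g i (ψ j)) g
      = pvUpdRow g i (fun r => js.foldl (fun r j => ψ j r) r) := by
  induction js with
  | nil => intro g; simp [updRow_id g i hi]
  | cons j t ih =>
    intro g
    rw [List.foldl_cons, ih, updRow_updRow g i _ _ hi]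
    rfl

lemma length_foldl_updRow (is : List Int) (φ : Int → List String → List String) :
    ∀ g, (is.foldl (fun g i => pvUpdRow g i (φ i)) g).length = g.length := by
  induction is with
  | nil => intro g; rfl
  | cons i t ih => intro g; rw [List.foldl_cons, ih, length_updRow]

lemma getElem?_foldl_updRow (is : List Int) (φ : Int → List String → List String)
    (h0 : ∀ i ∈ is, 0 ≤ i) (hnd : is.Nodup) (k : Nat) :
    ∀ g, (is.foldl (fun g i => pvUpdRow g i (φ i)) g)[k]?
      = if (k : Int) ∈ is ∧ k < g.length then φ (k : Int) <$> g[k]? else g[k]? := by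
  induction is with
  | nil => intro g; simp
  | cons i t ih =>
    intro g
    have hi : 0 ≤ i := h0 i (List.mem_cons_self ..)
    have hnt : i ∉ t := (List.nodup_cons.1 hnd).1
    rw [List.foldl_cons, ih (fun j hj => h0 j (List.mem_cons_of_mem _ hj)) (List.nodup_cons.1 hnd).2,
      length_updRow, getElem?_updRow g i _ hi]
    by_cases hA : (k : Int) ∈ t ∧ k < g.length
    · rw [if_pos hA, if_neg (show ¬((k : Int) = i ∧ k < g.length) from
          fun hc => hnt (by rw [← hc.1]; exact hA.1)),
        if_pos ⟨List.mem_cons_of_mem _ hA.1, hA.2⟩]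
    · rw [if_neg hA]
      by_cases hB : (k : Int) = i ∧ k < g.length
      · rw [if_pos hB, if_pos ⟨hB.1 ▸ List.mem_cons_self .., hB.2⟩, hB.1]
      · rw [if_neg hB, if_neg (fun hc => ?_)]
        rcases List.mem_cons.1 hc.1 with h | h
        · exact hB ⟨h, hc.2⟩
        · exact hA ⟨h, hc.2⟩

lemma getElem?_foldl_setRow (js : List Int) (v : String) (h0 : ∀ j ∈ js, 0 ≤ j) (k : Nat) :
    ∀ r : List String, (js.foldl (fun r j => PySem.List.pySetD r j v) r)[k]?
      = if (k : Int) ∈ js ∧ k < r.length then some v else r[k]? := by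
  induction js with
  | nil => intro r; simp
  | cons j t ih =>
    intro r
    have hj : 0 ≤ j := h0 j (List.mem_cons_self ..)
    rw [List.foldl_cons, PySem.List.pySetD_of_nonneg _ _ hj,
      ih (fun x hx => h0 x (List.mem_cons_of_mem _ hx)), List.length_set, List.getElem?_set]
    by_cases hA : (k : Int) ∈ t ∧ k < r.length
    · rw [if_pos hA, if_pos ⟨List.mem_cons_of_mem _ hA.1, hA.2⟩]
    · rw [if_neg hA]
      by_cases hB : j.toNat = k ∧ k < r.length
      · rw [if_pos hB.1, if_pos (hB.1 ▸ hB.2), if_pos ⟨List.mem_cons.2 (Or.inl (by omega)), hB.2⟩]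
      · by_cases hC : j.toNat = k
        · rw [if_pos hC, if_neg (by omega), if_neg (fun hc => by omega),
            (List.getElem?_eq_none (by omega) : r[k]? = none)]
        · rw [if_neg hC, if_neg (fun hc => ?_)]
          rcases List.mem_cons.1 hc.1 with h | h
          · exact hC (by omega)
          · exact hA ⟨h, hc.2⟩

lemma pySetD_neg_one (r : List String) (v : String) (h : r ≠ []) :
    PySem.List.pySetD r (-1) v = r.set (r.length - 1) v := by
  have hl : 0 < r.length := List.length_pos_iff.2 h
  simp only [PySem.List.pySetD, PySem.List.pySet?, PySem.List.pyIdx?]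
  rw [if_neg (by omega), if_pos (by omega)]
  simp

lemma foldl_append_const {α β : Type} (l : List α) (x : β) :
    ∀ b : List β, l.foldl (fun g _ => g ++ [x]) b = b ++ List.replicate l.length x := by
  induction l with
  | nil => intro b; simp
  | cons a t ih =>
    intro b
    rw [List.foldl_cons, ih, List.append_assoc]
    simp [List.replicate_succ]

lemma init_grid_eq (m : Nat) :
    init_grid (m : Int) = List.replicate (2*m+3) (List.replicate (m+2) " ") := by
  unfold init_grid
  rw [foldl_append_const, PySem.List.pyRepeat_singleton, PySem.List.length_pyRange_one]
  have h1 : ((m : Int) + 2).toNat = m + 2 := by omega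
  have h2 : (2 * (m : Int) + 3 - 0).toNat = 2*m + 3 := by omega
  rw [h1, h2, List.nil_append]

lemma dashRow_eq (m : Nat) :
    List.foldl (fun r j => PySem.List.pySetD r j "-") (List.replicate (m+2) " ")
      (PySem.List.pyRange 1 ((m:Int)+1) 1)
    = dashN m := by
  unfold dashN
  refine List.ext_getElem? fun j => ?_
  rw [getElem?_foldl_setRow _ _ (fun x hx => by have := (PySem.List.mem_pyRange_one.1 hx).1; omega) j,
    List.length_replicate, List.getElem?_map]
  by_cases hj : j < m+2
  · rw [List.getElem?_range hj, Option.map_some]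
    by_cases hd : 1 ≤ j ∧ j ≤ m
    · rw [if_pos ⟨PySem.List.mem_pyRange_one.2 (by omega), hj⟩, if_pos hd]
    · rw [if_neg (fun hc => by have := PySem.List.mem_pyRange_one.1 hc.1; omega),
        List.getElem?_replicate, if_pos hj, if_neg hd]
  · rw [if_neg (fun hc => hj hc.2), List.getElem?_replicate, if_neg hj,
      List.getElem?_eq_none (by simpa using Nat.le_of_not_lt hj), Option.map_none]

lemma barRow_eq (m : Nat) :
    PySem.List.pySetD (PySem.List.pySetD (List.replicate (m+2) " ") 0 "|") (-1) "|"
    = barN m := by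
  unfold barN
  rw [PySem.List.pySetD_of_nonneg _ _ le_rfl,
    pySetD_neg_one _ _ (by apply List.ne_nil_of_length_pos; simp),
    List.length_set, List.length_replicate]
  simp only [Int.toNat_zero]
  refine List.ext_getElem? fun j => ?_
  rw [List.getElem?_map]
  by_cases hj : j < m+2
  · rw [List.getElem?_range hj, Option.map_some, List.getElem?_set]
    by_cases h1 : j = m+1
    · rw [if_pos (show m+2-1 = j by omega),
        if_pos (show m+2-1 < ((List.replicate (m+2) " ").set 0 "|").length by
          rw [List.length_set, List.length_replicate]; omega),
        if_pos (Or.inr h1)]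
    · rw [if_neg (show ¬(m+2-1 = j) by omega), List.getElem?_set]
      by_cases h0 : j = 0
      · rw [if_pos (show 0 = j by omega),
          if_pos (show 0 < (List.replicate (m+2) " " : List String).length by
            rw [List.length_replicate]; omega),
          if_pos (Or.inl h0)]
      · rw [if_neg (show ¬(0 = j) by omega), List.getElem?_replicate, if_pos hj,
          if_neg (show ¬(j = 0 ∨ j = m+1) by omega)]
  · rw [List.getElem?_eq_none (by simp; omega),
      List.getElem?_eq_none (by simpa using Nat.le_of_not_lt hj), Option.map_none]

lemma tailRow_eq (m : Nat) :
    PySem.List.pySetD (List.replicate (m+2) " ") (-1) "|"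
    = tailN m := by
  unfold tailN
  rw [pySetD_neg_one _ _ (by apply List.ne_nil_of_length_pos; simp), List.length_replicate]
  refine List.ext_getElem? fun j => ?_
  rw [List.getElem?_map]
  by_cases hj : j < m+2
  · rw [List.getElem?_range hj, Option.map_some, List.getElem?_set]
    by_cases h1 : j = m+1
    · rw [if_pos (by omega), if_pos (by rw [List.length_replicate]; omega), if_pos h1]
    · rw [if_neg (by omega), List.getElem?_replicate, if_pos hj, if_neg h1]
  · rw [List.getElem?_eq_none (by simp; omega),
      List.getElem?_eq_none (by simpa using Nat.le_of_not_lt hj), Option.map_none]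

lemma rowsForm_getElem? (m k : Nat) : (pvRowsForm m)[k]?
    = if k < 2*m+3 then
        some (if 1 ≤ k ∧ k ≤ m then barN m
          else if k = m+1 then dashN m
          else if m+2 ≤ k ∧ k ≤ 2*m+1 then tailN m
          else List.replicate (m+2) " ")
      else none := by
  unfold pvRowsForm
  rw [List.getElem?_map]
  by_cases hk : k < 2*m+3
  · rw [List.getElem?_range hk, if_pos hk, Option.map_some]
  · rw [List.getElem?_eq_none (by simpa using Nat.le_of_not_lt hk), if_neg hk, Option.map_none]

lemma print_4_eq_rowsForm (m : Nat) : print_4 (m : Int) = pvRowsForm m := by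
  have step1 : print_4 (m : Int)
      = List.foldl (fun g i => pvUpdRow g i (fun r => PySem.List.pySetD r (-1) "|"))
          (List.foldl (fun g i =>
              pvUpdRow (pvUpdRow g i (fun r => PySem.List.pySetD r 0 "|")) i
                (fun r => PySem.List.pySetD r (-1) "|"))
            (List.foldl (fun g j => pvUpdRow g ((m:Int)+1) (fun r => PySem.List.pySetD r j "-"))
              (init_grid (m : Int)) (PySem.List.pyRange 1 ((m:Int)+1) 1))
            (PySem.List.pyRange 1 ((m:Int)+1) 1))
          (PySem.List.pyRange ((m:Int)+2) (2*(m:Int)+2) 1) := rfl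
  rw [step1, init_grid_eq m,
    foldl_updRow_same (PySem.List.pyRange 1 ((m:Int)+1) 1)
      (fun j r => PySem.List.pySetD r j "-") ((m:Int)+1) (by positivity)
      (List.replicate (2*m+3) (List.replicate (m+2) " ")),
    PySem.List.foldl_congr_mem (PySem.List.pyRange 1 ((m:Int)+1) 1)
      (fun g i => pvUpdRow (pvUpdRow g i (fun r => PySem.List.pySetD r 0 "|")) i
        (fun r => PySem.List.pySetD r (-1) "|"))
      (fun g i => pvUpdRow g i
        (fun r => PySem.List.pySetD (PySem.List.pySetD r 0 "|") (-1) "|"))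
      _ (fun acc i hi => by
        have h0 : 0 ≤ i := by have := (PySem.List.mem_pyRange_one.1 hi).1; omega
        exact updRow_updRow _ _ _ _ h0)]
  refine List.ext_getElem? fun k => ?_
  rw [rowsForm_getElem?,
    getElem?_foldl_updRow _ (fun _ r => PySem.List.pySetD r (-1) "|")
      (fun i hi => by have := (PySem.List.mem_pyRange_one.1 hi).1; omega)
      (PySem.List.nodup_pyRange_one _ _) k _,
    getElem?_foldl_updRow _ (fun _ r => PySem.List.pySetD (PySem.List.pySetD r 0 "|") (-1) "|")
      (fun i hi => by have := (PySem.List.mem_pyRange_one.1 hi).1; omega)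
      (PySem.List.nodup_pyRange_one _ _) k _,
    getElem?_updRow _ _ _ (by positivity) k]
  simp only [length_foldl_updRow, length_updRow, List.length_replicate]
  by_cases hk : k < 2*m+3
  · rw [List.getElem?_replicate, if_pos hk]
    by_cases hA : k = m+1
    · rw [if_neg (fun hc => by have := PySem.List.mem_pyRange_one.1 hc.1; omega),
        if_neg (fun hc => by have := PySem.List.mem_pyRange_one.1 hc.1; omega),
        if_pos ⟨by omega, hk⟩, if_pos hk, if_neg (show ¬(1 ≤ k ∧ k ≤ m) by omega), if_pos hA]
      exact congrArg some (dashRow_eq m)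
    · by_cases hB : 1 ≤ k ∧ k ≤ m
      · rw [if_neg (fun hc => by have := PySem.List.mem_pyRange_one.1 hc.1; omega),
          if_pos ⟨PySem.List.mem_pyRange_one.2 (by omega), hk⟩,
          if_neg (fun hc => by omega), if_pos hk, if_pos hB]
        exact congrArg some (barRow_eq m)
      · by_cases hC : m+2 ≤ k ∧ k ≤ 2*m+1
        · rw [if_pos ⟨PySem.List.mem_pyRange_one.2 (by omega), hk⟩,
            if_neg (fun hc => by have := PySem.List.mem_pyRange_one.1 hc.1; omega),
            if_neg (fun hc => by omega), if_pos hk,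
            if_neg hB, if_neg hA, if_pos hC]
          exact congrArg some (tailRow_eq m)
        · rw [if_neg (fun hc => by have := PySem.List.mem_pyRange_one.1 hc.1; omega),
            if_neg (fun hc => by have := PySem.List.mem_pyRange_one.1 hc.1; omega),
            if_neg (fun hc => by omega), if_pos hk,
            if_neg hB, if_neg hA, if_neg hC]
  · rw [List.getElem?_replicate, if_neg hk]
    split_ifs <;> rfl

-- ---- B-side: zip of equal-length columns, and the cells of each column shape ----
lemma pvZipStar_nil : pvZipStar [] = [] := by
  rw [pvZipStar.eq_def]
  simp

lemma pvZipStar_eq (n : Nat) : ∀ cols : List (List String), cols ≠ [] →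
    (∀ c ∈ cols, c.length = n) →
    pvZipStar cols = (List.range n).map (fun i => cols.map (fun c => c.getD i " ")) := by
  induction n with
  | zero =>
    intro cols hne hlen
    obtain ⟨c, hc⟩ := List.exists_mem_of_ne_nil _ hne
    rw [pvZipStar.eq_def, if_pos (Or.inr (List.any_eq_true.2 ⟨c, hc,
      by simp [List.eq_nil_of_length_eq_zero (hlen c hc)]⟩))]
    simp
  | succ n ih =>
    intro cols hne hlen
    rw [pvZipStar.eq_def, if_neg (by
      rintro (hc | hc)
      · exact hne hc
      · obtain ⟨c, hcm, hce⟩ := List.any_eq_true.1 hc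
        have := hlen c hcm
        rw [List.isEmpty_iff] at hce
        rw [hce] at this
        simp at this)]
    rw [ih (cols.map (·.tail)) (by simpa using hne)
      (by intro c hc
          obtain ⟨c0, hc0, rfl⟩ := List.mem_map.1 hc
          have := hlen c0 hc0
          simp [List.length_tail, this]),
      List.range_succ_eq_map, List.map_cons, List.map_map]
    congr 1
    refine List.map_congr_left fun i _ => ?_
    rw [List.map_map]
    refine List.map_congr_left fun c hc => ?_
    have hl := hlen c hc
    cases c with
    | nil => simp at hl
    | cons a t => simp

-- Nat-level forms of the three columns
lemma col_first_cast (m : Nat) : print_4_col_first (m : Int)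
    = " " :: (List.replicate m "|" ++ List.replicate (m+2) " ") := by
  unfold print_4_col_first
  rw [PySem.List.pyRepeat_singleton, PySem.List.pyRepeat_singleton,
    show ((m:Int)).toNat = m by omega, show ((m:Int)+2).toNat = m+2 by omega]
  rfl

lemma col_mid_cast (m : Nat) : print_4_col_mid (m : Int)
    = List.replicate (m+1) " " ++ "-" :: List.replicate (m+1) " " := by
  unfold print_4_col_mid
  rw [PySem.List.pyRepeat_singleton, show ((m:Int)+1).toNat = m+1 by omega]
  simp

lemma col_last_cast (m : Nat) : print_4_col_last (m : Int)
    = " " :: (List.replicate m "|" ++ " " :: (List.replicate m "|" ++ [" "])) := by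
  unfold print_4_col_last
  rw [PySem.List.pyRepeat_singleton, show ((m:Int)).toNat = m by omega]
  simp

lemma getD_col_first (m k : Nat) :
    (" " :: (List.replicate m "|" ++ List.replicate (m+2) " ")).getD k " "
    = if 1 ≤ k ∧ k ≤ m then "|" else " " := by
  cases k with
  | zero => simp
  | succ k' =>
    simp only [List.getD, List.getElem?_cons_succ, List.getElem?_append, List.length_replicate,
      List.getElem?_replicate]
    split_ifs <;> simp_all <;> omega

lemma getD_col_mid (m k : Nat) :
    (List.replicate (m+1) " " ++ "-" :: List.replicate (m+1) " ").getD k " "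
    = if k = m+1 then "-" else " " := by
  simp only [List.getD, List.getElem?_append, List.length_replicate, List.getElem?_replicate]
  by_cases h : k < m+1
  · rw [if_pos h, if_pos h, if_neg (by omega)]
    rfl
  · rw [if_neg h]
    by_cases h2 : k = m+1
    · rw [if_pos h2]
      have he : k - (m+1) = 0 := by omega
      rw [he]
      rfl
    · rw [if_neg h2]
      have he : k - (m+1) = (k - (m+1) - 1) + 1 := by omega
      rw [he]
      simp only [List.getElem?_cons_succ, List.getElem?_replicate]
      split_ifs <;> rfl

lemma getD_col_last (m k : Nat) :
    (" " :: (List.replicate m "|" ++ " " :: (List.replicate m "|" ++ [" "]))).getD k " "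
    = if (1 ≤ k ∧ k ≤ m) ∨ (m+2 ≤ k ∧ k ≤ 2*m+1) then "|" else " " := by
  cases k with
  | zero => simp
  | succ k' =>
    simp only [List.getD, List.getElem?_cons_succ]
    by_cases h1 : k' < m
    · rw [List.getElem?_append_left (by simpa using h1), List.getElem?_replicate, if_pos h1,
        if_pos (Or.inl ⟨by omega, by omega⟩)]
      rfl
    · rw [List.getElem?_append_right (by simpa using h1), List.length_replicate]
      by_cases h2 : k' = m
      · have he : k' - m = 0 := by omega
        rw [he]
        simp only [List.getElem?_cons_zero]
        rw [if_neg (by omega)]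
        rfl
      · have he : k' - m = (k' - m - 1) + 1 := by omega
        rw [he]
        simp only [List.getElem?_cons_succ]
        by_cases h3 : k' - m - 1 < m
        · rw [List.getElem?_append_left (by simpa using h3), List.getElem?_replicate, if_pos h3,
            if_pos (Or.inr ⟨by omega, by omega⟩)]
          rfl
        · rw [List.getElem?_append_right (by simpa using h3), List.length_replicate,
            if_neg (by omega)]
          rcases Nat.lt_or_ge (k' - m - 1 - m) 1 with h4 | h4
          · have he2 : k' - m - 1 - m = 0 := by omega
            rw [he2]
            rfl
          · rw [List.getElem?_eq_none (by simpa using h4)]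
            rfl

-- the column selected for index j, at Nat level
def pvColN (m j : Nat) : List String :=
  if j = 0 then " " :: (List.replicate m "|" ++ List.replicate (m+2) " ")
  else if j = m+1 then " " :: (List.replicate m "|" ++ " " :: (List.replicate m "|" ++ [" "]))
  else List.replicate (m+1) " " ++ "-" :: List.replicate (m+1) " "

lemma pvColN_length (m j : Nat) : (pvColN m j).length = 2*m+3 := by
  unfold pvColN
  split_ifs <;> simp <;> omega

lemma getD_pvColN (m j k : Nat) :
    (pvColN m j).getD k " "
    = if j = 0 then (if 1 ≤ k ∧ k ≤ m then "|" else " ")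
      else if j = m+1 then (if (1 ≤ k ∧ k ≤ m) ∨ (m+2 ≤ k ∧ k ≤ 2*m+1) then "|" else " ")
      else (if k = m+1 then "-" else " ") := by
  unfold pvColN
  by_cases h0 : j = 0
  · rw [if_pos h0, if_pos h0, getD_col_first]
  · rw [if_neg h0, if_neg h0]
    by_cases h1 : j = m+1
    · rw [if_pos h1, if_pos h1, getD_col_last]
    · rw [if_neg h1, if_neg h1, getD_col_mid]

lemma print_4_alt_eq_rowsForm (m : Nat) : print_4_alt (m : Int) = pvRowsForm m := by
  have hcols : (PySem.List.pyRange 0 ((m:Int)+2) 1).map (fun j =>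
      if j = 0 then print_4_col_first (m:Int)
      else if j = (m:Int)+1 then print_4_col_last (m:Int)
      else print_4_col_mid (m:Int))
      = (List.range (m+2)).map (pvColN m) := by
    rw [show (m:Int)+2 = ((m+2 : Nat) : Int) by push_cast; ring,
      PySem.List.pyRange_zero_natCast, List.map_map]
    refine List.map_congr_left fun j _ => ?_
    simp only [Function.comp_apply, pvColN]
    by_cases hj0 : j = 0
    · rw [if_pos (by exact_mod_cast congrArg (Nat.cast : Nat → Int) hj0), if_pos hj0,
        col_first_cast]
    · rw [if_neg (fun hc => hj0 (by exact_mod_cast hc))]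
      by_cases hj1 : j = m+1
      · rw [if_pos (by rw [hj1]; push_cast; ring), if_neg hj0, if_pos hj1, col_last_cast]
      · rw [if_neg (fun hc => hj1 (by omega)), if_neg hj0, if_neg hj1, col_mid_cast]
  show pvZipStar _ = _
  rw [hcols, pvZipStar_eq (2*m+3) _ (by simp)
    (by intro c hc
        obtain ⟨j, _, rfl⟩ := List.mem_map.1 hc
        exact pvColN_length m j)]
  unfold pvRowsForm
  refine List.map_congr_left fun k hk => ?_
  have hk3 : k < 2*m+3 := List.mem_range.1 hk
  rw [List.map_map]
  by_cases hA : 1 ≤ k ∧ k ≤ m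
  · rw [if_pos hA]
    unfold barN
    refine List.map_congr_left fun j hj => ?_
    have hj2 : j < m+2 := List.mem_range.1 hj
    rw [Function.comp_apply, getD_pvColN m j k]
    by_cases h0 : j = 0
    · rw [if_pos h0, if_pos hA, if_pos (Or.inl h0)]
    · rw [if_neg h0]
      by_cases h1 : j = m+1
      · rw [if_pos h1, if_pos (Or.inl hA), if_pos (Or.inr h1)]
      · rw [if_neg h1, if_neg (by omega), if_neg (by omega)]
  · rw [if_neg hA]
    by_cases hB : k = m+1
    · rw [if_pos hB]
      unfold dashN
      refine List.map_congr_left fun j hj => ?_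
      have hj2 : j < m+2 := List.mem_range.1 hj
      rw [Function.comp_apply, getD_pvColN m j k]
      by_cases h0 : j = 0
      · rw [if_pos h0, if_neg (by omega), if_neg (by omega)]
      · rw [if_neg h0]
        by_cases h1 : j = m+1
        · rw [if_pos h1, if_neg (by omega), if_neg (by omega)]
        · rw [if_neg h1, if_pos hB, if_pos ⟨by omega, by omega⟩]
    · rw [if_neg hB]
      by_cases hC : m+2 ≤ k ∧ k ≤ 2*m+1
      · rw [if_pos hC]
        unfold tailN
        refine List.map_congr_left fun j hj => ?_
        have hj2 : j < m+2 := List.mem_range.1 hj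
        rw [Function.comp_apply, getD_pvColN m j k]
        by_cases h0 : j = 0
        · rw [if_pos h0, if_neg (by omega), if_neg (by omega)]
        · rw [if_neg h0]
          by_cases h1 : j = m+1
          · rw [if_pos h1, if_pos (Or.inr hC), if_pos h1]
          · rw [if_neg h1, if_neg (by omega), if_neg h1]
      · rw [if_neg hC]
        rw [show (List.replicate (m+2) " " : List String)
            = (List.range (m+2)).map (fun _ => " ") by
          simp [List.map_const', List.length_range]]
        refine List.map_congr_left fun j hj => ?_
        have hj2 : j < m+2 := List.mem_range.1 hj
        rw [Function.comp_apply, getD_pvColN m j k]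
        by_cases h0 : j = 0
        · rw [if_pos h0, if_neg (by omega)]
        · rw [if_neg h0]
          by_cases h1 : j = m+1
          · rw [if_pos h1, if_neg (by omega)]
          · rw [if_neg h1, if_neg (by omega)]

-- ===== VERDICT (by name: the statement is the Claim_ definition above) =====
theorem print_4_spec : Claim_equal_print_4 := by
  intro s _ hpre
  unfold Spec_print_4
  by_cases hs : 0 ≤ s
  · obtain ⟨m, rfl⟩ := Int.eq_ofNat_of_zero_le hs
    rw [print_4_eq_rowsForm m, print_4_alt_eq_rowsForm m]
  · have h2 : s ≤ -2 := by unfold Pre_print_4 at hpre; omega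
    have e1 : PySem.List.pyRange 0 (2*s+3) 1 = [] := PySem.List.pyRange_one_eq_nil (by omega)
    have e2 : PySem.List.pyRange 1 (s+1) 1 = [] := PySem.List.pyRange_one_eq_nil (by omega)
    have e3 : PySem.List.pyRange (s+2) (2*s+2) 1 = [] := PySem.List.pyRange_one_eq_nil (by omega)
    have e4 : PySem.List.pyRange 0 (s+2) 1 = [] := PySem.List.pyRange_one_eq_nil (by omega)
    simp [print_4, print_4_alt, init_grid, pvZipStar_nil, e1, e2, e3, e4]
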